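-- pv_equiv track=rewrite | github.com/cupkk/Hydrogen-leak | scripts/monitor_56case_remote.py | choose_gpu
-- ===== SOURCE A (Python) =====
-- def choose_gpu(gpus, preferred):
--     for gpu in gpus:
--         if gpu["index"] == preferred and gpu["memory_used"] < 1000:
--             return gpu["index"]
--     idle = [g["index"] for g in gpus if g["memory_used"] < 1000]
--     if idle:
--         return idle[0]
--     return None
-- ===== SOURCE B (Python) =====
-- def choose_gpu(gpus, preferred):
--     first_idle = None
--     for gpu in gpus:
--         if gpu["memory_used"] < 1000:
--             idx = gpu["index"]
--             if idx == preferred: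
--                 return idx
--             if first_idle is None:
--                 first_idle = idx
--     return first_idle
-- ===== Notes on version B (the rewrite author's own statement) =====
-- stated objective: simpler
-- what changed: Collapses A's two scans (a return-early loop plus a full list-comprehension rebuild of the idle list) into a single pass that returns the preferred GPU on sight and otherwise remembers only the first idle index.
-- outside the precondition, e.g. on choose_gpu([{'index': 0, 'memory_used': 0}, {}], 0): A returns 0, B returns 0
import Mathlib
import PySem

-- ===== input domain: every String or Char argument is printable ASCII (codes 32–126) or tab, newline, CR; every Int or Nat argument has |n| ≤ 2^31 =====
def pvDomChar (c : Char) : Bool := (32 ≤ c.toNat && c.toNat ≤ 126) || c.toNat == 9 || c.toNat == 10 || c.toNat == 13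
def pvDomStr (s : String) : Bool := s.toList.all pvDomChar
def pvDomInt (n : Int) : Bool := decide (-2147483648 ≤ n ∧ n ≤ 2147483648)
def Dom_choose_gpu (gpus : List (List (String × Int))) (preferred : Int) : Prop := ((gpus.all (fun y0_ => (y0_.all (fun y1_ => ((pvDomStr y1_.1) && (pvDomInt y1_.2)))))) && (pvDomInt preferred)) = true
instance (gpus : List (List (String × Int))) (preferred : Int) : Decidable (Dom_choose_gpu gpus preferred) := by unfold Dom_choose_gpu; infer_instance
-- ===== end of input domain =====

-- B replaces A's two scans (return-early loop + rebuilt idle list) with one pass that remembers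
-- the first idle index; return values proved equal on Pre_ (every gpu dict carries both keys).

-- dict lookup gpu["k"]; exact under Pre_choose_gpu (the key is present, so the Python KeyError
-- branch is unreachable and the default 0 is never taken)
def pvLook (g : List (String × Int)) (k : String) : Int := (PySem.Dict.mk g).getD k 0

-- ===== PORT A =====
-- A's first loop: return gpu["index"] on the first gpu with index == preferred and memory_used < 1000
def pvLoopA (gpus : List (List (String × Int))) (preferred : Int) : Option Int :=
  match gpus with
  | [] => none
  | g :: rest =>
    if pvLook g "index" = preferred ∧ pvLook g "memory_used" < 1000 then some (pvLook g "index")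
    else pvLoopA rest preferred

def choose_gpu (gpus : List (List (String × Int))) (preferred : Int) : Option Int :=
  match pvLoopA gpus preferred with
  | some r => some r
  | none =>
    -- idle = [g["index"] for g in gpus if g["memory_used"] < 1000]; return idle[0] if idle else None
    match (gpus.filter (fun g => pvLook g "memory_used" < 1000)).map (fun g => pvLook g "index") with
    | [] => none
    | x :: _ => some x

-- ===== PORT B =====
-- single pass carrying first_idle
def pvLoopB (gpus : List (List (String × Int))) (preferred : Int) (firstIdle : Option Int) : Option Int :=
  match gpus with
  | [] => firstIdle
  | g :: rest =>
    if pvLook g "memory_used" < 1000 then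
      let i := pvLook g "index"
      if i = preferred then some i
      else pvLoopB rest preferred (if firstIdle.isNone then some i else firstIdle)
    else pvLoopB rest preferred firstIdle

def choose_gpu_alt (gpus : List (List (String × Int))) (preferred : Int) : Option Int :=
  pvLoopB gpus preferred none

-- ===== PRECONDITION & SPEC =====
-- Pre_ excludes gpu lists in which some dict lacks the "index" or "memory_used" key: Python A
-- raises KeyError there (except when an earlier idle preferred gpu makes it return first).
def Pre_choose_gpu (gpus : List (List (String × Int))) (_preferred : Int) : Prop :=
  ∀ g ∈ gpus, (PySem.Dict.mk g).contains "index" = true ∧ (PySem.Dict.mk g).contains "memory_used" = true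
instance (gpus : List (List (String × Int))) (preferred : Int) : Decidable (Pre_choose_gpu gpus preferred) := by unfold Pre_choose_gpu; infer_instance

def pvWitness_choose_gpu : (List (List (String × Int))) × Int :=
  ([[("index", 0), ("memory_used", 0)], [("index", 1), ("memory_used", 2000)]], 1)

def Spec_choose_gpu (gpus : List (List (String × Int))) (preferred : Int) (out : Option Int) : Prop := out = choose_gpu_alt gpus preferred
instance (gpus : List (List (String × Int))) (preferred : Int) (out : Option Int) : Decidable (Spec_choose_gpu gpus preferred out) := by unfold Spec_choose_gpu; infer_instance

-- ===== CLAIM (what is proved, stated in full; the proofs are below) =====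
def Claim_equal_choose_gpu : Prop := ∀ (gpus : List (List (String × Int))) (preferred : Int), Dom_choose_gpu gpus preferred → Pre_choose_gpu gpus preferred → Spec_choose_gpu gpus preferred (choose_gpu gpus preferred)

-- ===== LEMMAS AND PROOFS =====

-- head of A's idle list
def pvIdleHead (gpus : List (List (String × Int))) : Option Int :=
  ((gpus.filter (fun g => pvLook g "memory_used" < 1000)).map (fun g => pvLook g "index")).head?

theorem pvLoopB_eq (gpus : List (List (String × Int))) (preferred : Int) :
    ∀ firstIdle : Option Int,
      pvLoopB gpus preferred firstIdle =
        match pvLoopA gpus preferred with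
        | some r => some r
        | none => match firstIdle with
                  | some a => some a
                  | none => pvIdleHead gpus := by
  induction gpus with
  | nil => intro firstIdle; cases firstIdle <;> simp [pvLoopB, pvLoopA, pvIdleHead]
  | cons g rest ih =>
    intro firstIdle
    by_cases hm : pvLook g "memory_used" < 1000
    · by_cases hp : pvLook g "index" = preferred
      · simp [pvLoopB, pvLoopA, hm, hp]
      · have hA : pvLoopA (g :: rest) preferred = pvLoopA rest preferred := by
          simp [pvLoopA, hp]
        have hI : pvIdleHead (g :: rest) = some (pvLook g "index") := by
          simp [pvIdleHead, hm]
        rw [show pvLoopB (g :: rest) preferred firstIdle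
              = pvLoopB rest preferred (if firstIdle.isNone then some (pvLook g "index") else firstIdle) by
            simp [pvLoopB, hm, hp]]
        rw [ih, hA, hI]
        cases firstIdle <;> cases pvLoopA rest preferred <;> simp
    · have hA : pvLoopA (g :: rest) preferred = pvLoopA rest preferred := by
        simp [pvLoopA, hm]
      have hI : pvIdleHead (g :: rest) = pvIdleHead rest := by
        simp [pvIdleHead, hm]
      rw [show pvLoopB (g :: rest) preferred firstIdle = pvLoopB rest preferred firstIdle by
            simp [pvLoopB, hm]]
      rw [ih, hA, hI]

-- ===== VERDICT (by name: the statement is the Claim_ definition above) =====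
theorem choose_gpu_spec : Claim_equal_choose_gpu := by
  intro gpus preferred _ _
  unfold Spec_choose_gpu choose_gpu choose_gpu_alt
  rw [pvLoopB_eq]
  cases pvLoopA gpus preferred
  · unfold pvIdleHead
    cases (gpus.filter (fun g => pvLook g "memory_used" < 1000)).map (fun g => pvLook g "index") <;> simp
  · simp
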